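-- pv_equiv track=rewrite | github.com/surajpotnuru/azkaban-workflow-designer | backend_old.py | checkForDuplicateNodes
-- ===== SOURCE A (Python) =====
-- def checkForDuplicateNodes(nodesData):
--     nodesNames = []
--     for node in nodesData:
--         nodesNames.append(
--             (node['text'] + node['type']).upper()
--         )
--     if len(set(nodesNames)) == len(nodesNames):
--         return False
--     else:
--         return True
-- ===== SOURCE B (Python) =====
-- def checkForDuplicateNodes(nodesData):
--     # Sort all keys (built in full first, so KeyError fires on the same node as A),
--     # then look for an equal adjacent pair.
--     keys = sorted((node['text'] + node['type']).upper() for node in nodesData)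
--     return any(a == b for a, b in zip(keys, keys[1:]))
-- ===== Notes on version B (the rewrite author's own statement) =====
-- stated objective: alternative
-- what changed: A collects all keys and compares len(set(keys)) with len(keys); B sorts the key list and scans adjacent pairs for an equal neighbour, a sort-based duplicate test with no set at all.
-- outside the precondition, e.g. on checkForDuplicateNodes([{'text': 'a'}]): A raises KeyError, B raises KeyError
import Mathlib
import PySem

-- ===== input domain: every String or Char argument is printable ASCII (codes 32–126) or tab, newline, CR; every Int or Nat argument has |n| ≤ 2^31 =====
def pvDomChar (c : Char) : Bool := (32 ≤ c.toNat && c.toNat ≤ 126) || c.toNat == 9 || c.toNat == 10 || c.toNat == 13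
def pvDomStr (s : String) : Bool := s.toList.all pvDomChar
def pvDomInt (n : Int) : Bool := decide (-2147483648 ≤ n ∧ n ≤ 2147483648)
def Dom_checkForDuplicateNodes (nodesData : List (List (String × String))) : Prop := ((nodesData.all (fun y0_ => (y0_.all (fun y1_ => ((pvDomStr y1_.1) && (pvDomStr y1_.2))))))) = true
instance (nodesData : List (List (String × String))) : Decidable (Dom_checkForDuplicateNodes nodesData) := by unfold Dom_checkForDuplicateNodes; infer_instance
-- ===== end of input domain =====

-- B replaces A's set-cardinality duplicate test by sorting the key list and scanning
-- adjacent pairs for an equal neighbour (keys are still all built first, so a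
-- malformed node raises KeyError exactly where A does); objective: alternative.

-- ===== PORT A =====
-- (node['text'] + node['type']).upper(), the key both Pythons compute per node
def keyOf (node : List (String × String)) : String :=
  String.ofList (PySem.Chars.upper (((PySem.Dict.ofList node).getD "text" "").toList ++ ((PySem.Dict.ofList node).getD "type" "").toList))

def checkForDuplicateNodes (nodesData : List (List (String × String))) : Bool :=
  let nodesNames := nodesData.foldl (fun acc node => acc ++ [keyOf node]) ([] : List String)
  if (PySem.Set.ofList nodesNames).length = nodesNames.length then false else true

-- ===== PORT B =====
-- keys = sorted(key(node) for node in nodesData); any(a == b for a, b in zip(keys, keys[1:]))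
def checkForDuplicateNodes_alt (nodesData : List (List (String × String))) : Bool :=
  let keys := PySem.List.sorted (nodesData.map keyOf) (fun x => x) false
  (keys.zip (PySem.List.slice keys (some 1) none)).any (fun p => p.1 == p.2)

-- ===== PRECONDITION & SPEC =====
-- Pre_ excludes exactly the inputs where Python A raises KeyError: a node missing the 'text' or 'type' key.
def Pre_checkForDuplicateNodes (nodesData : List (List (String × String))) : Prop :=
  ∀ node ∈ nodesData, (PySem.Dict.ofList node).contains "text" = true ∧ (PySem.Dict.ofList node).contains "type" = true
instance (nodesData : List (List (String × String))) : Decidable (Pre_checkForDuplicateNodes nodesData) := by unfold Pre_checkForDuplicateNodes; infer_instance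

def pvWitness_checkForDuplicateNodes : (List (List (String × String))) :=
  [[("text", "a"), ("type", "job")], [("text", "A"), ("type", "JOB")]]

def Spec_checkForDuplicateNodes (nodesData : List (List (String × String))) (out : Bool) : Prop := out = checkForDuplicateNodes_alt nodesData
instance (nodesData : List (List (String × String))) (out : Bool) : Decidable (Spec_checkForDuplicateNodes nodesData out) := by unfold Spec_checkForDuplicateNodes; infer_instance

-- ===== CLAIM (what is proved, stated in full; the proofs are below) =====
def Claim_equal_checkForDuplicateNodes : Prop := ∀ (nodesData : List (List (String × String))), Dom_checkForDuplicateNodes nodesData → Pre_checkForDuplicateNodes nodesData → Spec_checkForDuplicateNodes nodesData (checkForDuplicateNodes nodesData)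

-- ===== LEMMAS AND PROOFS =====
lemma len_foldl_add_le (xs : List String) (s : PySem.Set String) :
    (xs.foldl PySem.Set.add s).length ≤ s.length + xs.length := by
  induction xs generalizing s with
  | nil => simp
  | cons x xs ih =>
    simp only [List.foldl_cons, List.length_cons]
    refine le_trans (ih _) ?_
    have : (PySem.Set.add s x).length ≤ s.length + 1 := by
      simp only [PySem.Set.add]
      split_ifs <;> simp
    omega

-- A's test: the set of the keys keeps the list's length iff the keys are distinct (and fresh w.r.t. s)
lemma len_foldl_add_iff (xs : List String) (s : PySem.Set String) :
    (xs.foldl PySem.Set.add s).length = s.length + xs.length ↔ (xs.Nodup ∧ ∀ x ∈ xs, x ∉ s) := by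
  induction xs generalizing s with
  | nil => simp
  | cons x xs ih =>
    simp only [List.foldl_cons, List.length_cons]
    by_cases hx : x ∈ s
    · have hadd : PySem.Set.add s x = s := by
        simp [PySem.Set.add, hx]
      rw [hadd]
      constructor
      · intro h
        have := len_foldl_add_le xs s
        omega
      · rintro ⟨-, h⟩
        exact absurd hx (h x (by simp))
    · have hadd : (PySem.Set.add s x).length = s.length + 1 := by
        simp [PySem.Set.add, hx]
      have hstep : s.length + (xs.length + 1) = (PySem.Set.add s x).length + xs.length := by omega
      rw [hstep, ih]
      simp only [List.nodup_cons, List.mem_cons]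
      constructor
      · rintro ⟨hn, h⟩
        have hxx : x ∉ xs := fun hm => (h x hm) (by simp [PySem.Set.mem_add])
        refine ⟨⟨hxx, hn⟩, ?_⟩
        rintro y (rfl | hy)
        · exact hx
        · intro hys; exact (h y hy) (by simp [PySem.Set.mem_add, hys])
      · rintro ⟨⟨hxx, hn⟩, h⟩
        refine ⟨hn, fun y hy hys => ?_⟩
        rw [PySem.Set.mem_add] at hys
        rcases hys with hys | rfl
        · exact (h y (Or.inr hy)) hys
        · exact hxx hy

-- B's scan: on a ≤-sorted list, no adjacent pair is equal iff the list has no duplicates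
lemma adj_any_eq_false_iff (l : List String) (hs : l.Pairwise (· ≤ ·)) :
    ((l.zip l.tail).any (fun p => p.1 == p.2) = false ↔ l.Nodup) := by
  induction l with
  | nil => simp
  | cons a t ih =>
    cases t with
    | nil => simp
    | cons b t =>
      rcases List.pairwise_cons.1 hs with ⟨hale, hs'⟩
      have hab : a ≤ b := hale b (by simp)
      have hbt : ∀ x ∈ t, b ≤ x := fun x hx => (List.pairwise_cons.1 hs').1 x hx
      simp only [List.tail_cons, List.zip_cons_cons, List.any_cons, Bool.or_eq_false_iff,
        beq_eq_false_iff_ne, ne_eq]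
      have ih' := ih hs'
      simp only [List.tail_cons] at ih'
      rw [ih']
      constructor
      · rintro ⟨hne, hnd⟩
        refine List.nodup_cons.2 ⟨?_, hnd⟩
        intro hmem
        rcases List.mem_cons.1 hmem with h | hat
        · exact hne h
        · exact hne (le_antisymm hab (hbt a hat))
      · intro hnd
        rcases List.nodup_cons.1 hnd with ⟨hna, hnd'⟩
        exact ⟨fun h => hna (by simp [h]), hnd'⟩

lemma ports_agree (nodesData : List (List (String × String))) :
    checkForDuplicateNodes nodesData = checkForDuplicateNodes_alt nodesData := by
  have hmap : nodesData.foldl (fun acc node => acc ++ [keyOf node]) ([] : List String)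
      = nodesData.map keyOf := by
    simpa using PySem.List.foldl_append_singleton_eq_map keyOf nodesData []
  simp only [checkForDuplicateNodes, checkForDuplicateNodes_alt, hmap,
    PySem.List.slice_from_one]
  set ks := nodesData.map keyOf
  set sk := PySem.List.sorted ks (fun x => x) false with hsk
  have hperm : sk.Perm ks := PySem.List.sorted_perm ks (fun x => x) false
  have hA : (PySem.Set.ofList ks).length = ks.length ↔ ks.Nodup := by
    rw [PySem.Set.ofList_eq_foldl]
    simpa using len_foldl_add_iff ks PySem.Set.empty
  have hpw : sk.Pairwise (· ≤ ·) := by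
    simpa using PySem.List.sorted_pairwise ks (fun x => x)
  have hB := adj_any_eq_false_iff sk hpw
  rw [hperm.nodup_iff] at hB
  by_cases h : ks.Nodup
  · rw [if_pos (hA.2 h)]
    exact (hB.2 h).symm
  · rw [if_neg (fun he => h (hA.1 he))]
    rcases Bool.eq_false_or_eq_true ((sk.zip sk.tail).any (fun p => p.1 == p.2)) with ht | hf
    · exact ht.symm
    · exact absurd (hB.1 hf) h

-- ===== VERDICT (by name: the statement is the Claim_ definition above) =====
theorem checkForDuplicateNodes_spec : Claim_equal_checkForDuplicateNodes := by
  intro nodesData _ _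
  exact ports_agree nodesData
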